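-- pv_equiv track=rewrite | github.com/Ayush-Jayatkar/Transit-IQ | backend/models/route_planner.py | find_nearest_stop
-- ===== SOURCE A (Python) =====
-- from typing import Dict, List, Optional, Tuple
--
-- def find_nearest_stop(query: str, stop_index: Dict) -> Optional[Dict]:
--     """
--     Find the best matching stop for a user-typed query.
--     Uses substring matching first, then fuzzy fallback.
--     """
--     q = query.strip().lower()
--     if not q:
--         return None
--
--     # Exact substring match
--     matches = [s for name, s in stop_index.items() if q in name.lower()]
--     if matches:
--         # Prefer shorter names (more specific match)
--         return min(matches, key=lambda s: len(s["name"]))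
--
--     # Token match — any word in query matches any word in stop name
--     q_tokens = set(q.split())
--     scored = []
--     for name, s in stop_index.items():
--         n_tokens = set(name.lower().split())
--         overlap = len(q_tokens & n_tokens)
--         if overlap > 0:
--             scored.append((overlap, s))
--     if scored:
--         return max(scored, key=lambda x: x[0])[1]
--
--     return None
-- ===== SOURCE B (Python) =====
-- def find_nearest_stop(query, stop_index):
--     q = query.strip().lower()
--     if not q:
--         return None
--     q_tokens = set(q.split())
--     best_sub = None   # (name_len, stop): smallest name length wins, first wins ties
--     best_tok = None   # (overlap, stop): largest token overlap wins, first wins ties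
--     for name, s in stop_index.items():
--         low = name.lower()
--         if q in low:
--             ln = len(s["name"])
--             if best_sub is None or ln < best_sub[0]:
--                 best_sub = (ln, s)
--         overlap = len(q_tokens & set(low.split()))
--         if overlap > 0 and (best_tok is None or overlap > best_tok[0]):
--             best_tok = (overlap, s)
--     if best_sub is not None:
--         return best_sub[1]
--     if best_tok is not None:
--         return best_tok[1]
--     return None
-- ===== Notes on version B (the rewrite author's own statement) =====
-- stated objective: alternative
-- what changed: B replaces A's two list-building passes (a matches list reduced by min, then a scored list reduced by max) with one streaming pass over the stops that maintains the current best substring match and best token-overlap match, choosing between the two accumulators at the end.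
import Mathlib
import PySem

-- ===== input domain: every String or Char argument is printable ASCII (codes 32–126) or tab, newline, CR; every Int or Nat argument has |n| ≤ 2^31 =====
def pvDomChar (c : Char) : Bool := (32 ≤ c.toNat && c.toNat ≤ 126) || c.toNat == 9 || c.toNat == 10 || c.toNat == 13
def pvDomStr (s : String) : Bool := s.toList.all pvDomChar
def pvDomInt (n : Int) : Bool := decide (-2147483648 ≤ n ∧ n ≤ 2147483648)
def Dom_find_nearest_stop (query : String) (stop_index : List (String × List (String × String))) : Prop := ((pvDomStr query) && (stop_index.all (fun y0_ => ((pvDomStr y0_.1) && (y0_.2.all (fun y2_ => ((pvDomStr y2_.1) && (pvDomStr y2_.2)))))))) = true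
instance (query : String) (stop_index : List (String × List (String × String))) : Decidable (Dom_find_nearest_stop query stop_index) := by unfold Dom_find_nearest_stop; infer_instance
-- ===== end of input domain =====

-- B replaces A's two list-building passes (matches list + min, scored list + max) by one
-- streaming pass keeping the current best substring match and best token match (objective: alternative).

-- ===== PORT A =====
-- dicts arrive as association lists; PySem.Dict.ofList applies Python's duplicate-key
-- (last value, first position) rule, so `d` is exactly the dict Python A iterates over.
def find_nearest_stop (query : String) (stop_index : List (String × List (String × String))) : Option (List (String × String)) :=
  let q := PySem.Str.lower (PySem.Str.strip query)
  if q = "" then none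
  else
    let d : PySem.Dict String (PySem.Dict String String) :=
      PySem.Dict.ofList (stop_index.map (fun p => (p.1, PySem.Dict.ofList p.2)))
    -- matches = [s for name, s in stop_index.items() if q in name.lower()]
    let matchesL := (d.items.filter (fun p => PySem.Str.isIn q (PySem.Str.lower p.1))).map (fun p => p.2)
    -- `if matches: return min(matches, key=…)` — min? is none exactly when matches == []
    -- (s["name"] ported as getD "name" ""; Pre_ excludes the KeyError inputs)
    match PySem.List.min? matchesL (fun s => PySem.Str.len (s.getD "name" "")) with
    | some m => some m.items
    | none =>
      let q_tokens : PySem.Set String := PySem.Set.ofList (PySem.Str.split₀ q)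
      let scored := d.items.foldl (fun acc p =>
          let n_tokens : PySem.Set String := PySem.Set.ofList (PySem.Str.split₀ (PySem.Str.lower p.1))
          let overlap := (PySem.Set.inter q_tokens n_tokens).length
          if overlap > 0 then acc ++ [(overlap, p.2)] else acc) []
      match PySem.List.max? scored (fun x => x.1) with
      | some x => some x.2.items
      | none => none

-- ===== PORT B =====
def find_nearest_stop_alt (query : String) (stop_index : List (String × List (String × String))) : Option (List (String × String)) :=
  let q := PySem.Str.lower (PySem.Str.strip query)
  if q = "" then none
  else
    let d : PySem.Dict String (PySem.Dict String String) :=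
      PySem.Dict.ofList (stop_index.map (fun p => (p.1, PySem.Dict.ofList p.2)))
    let q_tokens : PySem.Set String := PySem.Set.ofList (PySem.Str.split₀ q)
    let best := d.items.foldl
      (fun (acc : Option (Int × PySem.Dict String String) × Option (Nat × PySem.Dict String String)) p =>
        let low := PySem.Str.lower p.1
        let bsub :=
          if PySem.Str.isIn q low then
            let ln := PySem.Str.len (p.2.getD "name" "")
            match acc.1 with
            | none => some (ln, p.2)
            | some b => if ln < b.1 then some (ln, p.2) else some b
          else acc.1
        let overlap := (PySem.Set.inter q_tokens (PySem.Set.ofList (PySem.Str.split₀ low))).length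
        let btok :=
          if overlap > 0 then
            match acc.2 with
            | none => some (overlap, p.2)
            | some b => if overlap > b.1 then some (overlap, p.2) else some b
          else acc.2
        (bsub, btok))
      (none, none)
    match best.1 with
    | some b => some b.2.items
    | none =>
      match best.2 with
      | some b => some b.2.items
      | none => none

-- ===== PRECONDITION & SPEC =====
-- Pre_ excludes exactly the inputs where Python A raises KeyError: a non-empty query whose
-- lowered form is a substring of some stop's (effective, after dict duplicate-key collapse)
-- name while that stop's dict has no "name" key.
def Pre_find_nearest_stop (query : String) (stop_index : List (String × List (String × String))) : Prop :=
  PySem.Str.lower (PySem.Str.strip query) = "" ∨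
    ∀ p ∈ (PySem.Dict.ofList stop_index : PySem.Dict String (List (String × String))).items,
      PySem.Str.isIn (PySem.Str.lower (PySem.Str.strip query)) (PySem.Str.lower p.1) = true →
        (p.2.map Prod.fst).contains "name" = true
instance (query : String) (stop_index : List (String × List (String × String))) : Decidable (Pre_find_nearest_stop query stop_index) := by unfold Pre_find_nearest_stop; infer_instance
def pvWitness_find_nearest_stop : String × (List (String × List (String × String))) :=
  ("main", [("Main St", [("name", "Main St"), ("id", "1")])])
def Spec_find_nearest_stop (query : String) (stop_index : List (String × List (String × String))) (out : Option (List (String × String))) : Prop := out = find_nearest_stop_alt query stop_index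
instance (query : String) (stop_index : List (String × List (String × String))) (out : Option (List (String × String))) : Decidable (Spec_find_nearest_stop query stop_index out) := by unfold Spec_find_nearest_stop; infer_instance

-- ===== CLAIM (what is proved, stated in full; the proofs are below) =====
def Claim_equal_find_nearest_stop : Prop := ∀ (query : String) (stop_index : List (String × List (String × String))), Dom_find_nearest_stop query stop_index → Pre_find_nearest_stop query stop_index → Spec_find_nearest_stop query stop_index (find_nearest_stop query stop_index)

-- ===== LEMMAS AND PROOFS =====

-- B's single pass with the pair accumulator equals the two independent best-so-far folds
theorem fnss_split (q : String) (qt : PySem.Set String)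
    (xs : List (String × PySem.Dict String String))
    (a1 : Option (PySem.Dict String String)) (a2 : Option (Nat × PySem.Dict String String)) :
    xs.foldl
      (fun (acc : Option (Int × PySem.Dict String String) × Option (Nat × PySem.Dict String String)) p =>
        (if PySem.Str.isIn q (PySem.Str.lower p.1) then
            match acc.1 with
            | none => some (PySem.Str.len (p.2.getD "name" ""), p.2)
            | some b => if PySem.Str.len (p.2.getD "name" "") < b.1 then some (PySem.Str.len (p.2.getD "name" ""), p.2) else some b
          else acc.1,
         if (PySem.Set.inter qt (PySem.Set.ofList (PySem.Str.split₀ (PySem.Str.lower p.1)))).length > 0 then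
            match acc.2 with
            | none => some ((PySem.Set.inter qt (PySem.Set.ofList (PySem.Str.split₀ (PySem.Str.lower p.1)))).length, p.2)
            | some b => if (PySem.Set.inter qt (PySem.Set.ofList (PySem.Str.split₀ (PySem.Str.lower p.1)))).length > b.1 then some ((PySem.Set.inter qt (PySem.Set.ofList (PySem.Str.split₀ (PySem.Str.lower p.1)))).length, p.2) else some b
          else acc.2))
      (a1.map (fun m => (PySem.Str.len (m.getD "name" ""), m)), a2)
    = ((xs.foldl (fun a p =>
          if PySem.Str.isIn q (PySem.Str.lower p.1) then
            match a with
            | none => some p.2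
            | some m => if PySem.Str.len (p.2.getD "name" "") < PySem.Str.len (m.getD "name" "") then some p.2 else some m
          else a) a1).map (fun m => (PySem.Str.len (m.getD "name" ""), m)),
       xs.foldl (fun a p =>
          if (PySem.Set.inter qt (PySem.Set.ofList (PySem.Str.split₀ (PySem.Str.lower p.1)))).length > 0 then
            match a with
            | none => some ((PySem.Set.inter qt (PySem.Set.ofList (PySem.Str.split₀ (PySem.Str.lower p.1)))).length, p.2)
            | some b => if (PySem.Set.inter qt (PySem.Set.ofList (PySem.Str.split₀ (PySem.Str.lower p.1)))).length > b.1 then some ((PySem.Set.inter qt (PySem.Set.ofList (PySem.Str.split₀ (PySem.Str.lower p.1)))).length, p.2) else some b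
          else a) a2) := by
  induction xs generalizing a1 a2 with
  | nil => rfl
  | cons p t ih =>
    simp only [List.foldl_cons]
    rw [← ih]
    congr 1
    · by_cases h : PySem.Chars.isIn q.toList (PySem.Chars.lower p.1.toList) = true <;>
        cases a1 <;> simp [h] <;> split <;> rfl

-- the same statement started from the empty accumulators, as it appears in the ports
theorem fnss_split0 (q : String) (qt : PySem.Set String)
    (xs : List (String × PySem.Dict String String)) :
    xs.foldl
      (fun (acc : Option (Int × PySem.Dict String String) × Option (Nat × PySem.Dict String String)) p =>
        (if PySem.Str.isIn q (PySem.Str.lower p.1) then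
            match acc.1 with
            | none => some (PySem.Str.len (p.2.getD "name" ""), p.2)
            | some b => if PySem.Str.len (p.2.getD "name" "") < b.1 then some (PySem.Str.len (p.2.getD "name" ""), p.2) else some b
          else acc.1,
         if (PySem.Set.inter qt (PySem.Set.ofList (PySem.Str.split₀ (PySem.Str.lower p.1)))).length > 0 then
            match acc.2 with
            | none => some ((PySem.Set.inter qt (PySem.Set.ofList (PySem.Str.split₀ (PySem.Str.lower p.1)))).length, p.2)
            | some b => if (PySem.Set.inter qt (PySem.Set.ofList (PySem.Str.split₀ (PySem.Str.lower p.1)))).length > b.1 then some ((PySem.Set.inter qt (PySem.Set.ofList (PySem.Str.split₀ (PySem.Str.lower p.1)))).length, p.2) else some b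
          else acc.2))
      (none, none)
    = ((xs.foldl (fun a p =>
          if PySem.Str.isIn q (PySem.Str.lower p.1) then
            match a with
            | none => some p.2
            | some m => if PySem.Str.len (p.2.getD "name" "") < PySem.Str.len (m.getD "name" "") then some p.2 else some m
          else a) none).map (fun m => (PySem.Str.len (m.getD "name" ""), m)),
       xs.foldl (fun a p =>
          if (PySem.Set.inter qt (PySem.Set.ofList (PySem.Str.split₀ (PySem.Str.lower p.1)))).length > 0 then
            match a with
            | none => some ((PySem.Set.inter qt (PySem.Set.ofList (PySem.Str.split₀ (PySem.Str.lower p.1)))).length, p.2)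
            | some b => if (PySem.Set.inter qt (PySem.Set.ofList (PySem.Str.split₀ (PySem.Str.lower p.1)))).length > b.1 then some ((PySem.Set.inter qt (PySem.Set.ofList (PySem.Str.split₀ (PySem.Str.lower p.1)))).length, p.2) else some b
          else a) none) :=
  fnss_split q qt xs none none

-- A's "build matches, then min" is the first best-so-far fold
theorem fnss_min (q : String) (xs : List (String × PySem.Dict String String)) :
    PySem.List.min?
      ((xs.filter (fun p => PySem.Str.isIn q (PySem.Str.lower p.1))).map (fun p => p.2))
      (fun s => PySem.Str.len (s.getD "name" ""))
    = xs.foldl (fun a p =>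
        if PySem.Str.isIn q (PySem.Str.lower p.1) then
          match a with
          | none => some p.2
          | some m => if PySem.Str.len (p.2.getD "name" "") < PySem.Str.len (m.getD "name" "") then some p.2 else some m
        else a) none := by
  rw [PySem.List.min?, List.foldl_map, ← PySem.List.foldl_if_eq_foldl_filter]
  congr 1
  funext a p
  cases a <;> rfl

-- A's "build scored, then max" is the second best-so-far fold
theorem fnss_max (qt : PySem.Set String) (xs : List (String × PySem.Dict String String)) :
    PySem.List.max?
      (xs.foldl (fun acc p =>
          let n_tokens : PySem.Set String := PySem.Set.ofList (PySem.Str.split₀ (PySem.Str.lower p.1))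
          let overlap := (PySem.Set.inter qt n_tokens).length
          if overlap > 0 then acc ++ [(overlap, p.2)] else acc) [])
      (fun x => x.1)
    = xs.foldl (fun a p =>
        if (PySem.Set.inter qt (PySem.Set.ofList (PySem.Str.split₀ (PySem.Str.lower p.1)))).length > 0 then
          match a with
          | none => some ((PySem.Set.inter qt (PySem.Set.ofList (PySem.Str.split₀ (PySem.Str.lower p.1)))).length, p.2)
          | some b => if (PySem.Set.inter qt (PySem.Set.ofList (PySem.Str.split₀ (PySem.Str.lower p.1)))).length > b.1 then some ((PySem.Set.inter qt (PySem.Set.ofList (PySem.Str.split₀ (PySem.Str.lower p.1)))).length, p.2) else some b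
        else a) none := by
  rw [PySem.List.foldl_append_ite
        (p := fun p : String × PySem.Dict String String =>
          (PySem.Set.inter qt (PySem.Set.ofList (PySem.Str.split₀ (PySem.Str.lower p.1)))).length > 0)
        (f := fun p : String × PySem.Dict String String =>
          ((PySem.Set.inter qt (PySem.Set.ofList (PySem.Str.split₀ (PySem.Str.lower p.1)))).length, p.2))]
  rw [List.nil_append, PySem.List.max?, List.foldl_map, ← PySem.List.foldl_ite_eq_foldl_filter]
  congr 1
  funext a p
  cases a <;> rfl

-- ===== VERDICT (by name: the statement is the Claim_ definition above) =====
theorem find_nearest_stop_spec : Claim_equal_find_nearest_stop := by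
  intro query stop_index _ _
  unfold Spec_find_nearest_stop find_nearest_stop find_nearest_stop_alt
  by_cases hq : PySem.Str.lower (PySem.Str.strip query) = ""
  · simp [hq]
  · simp only [if_neg hq]
    rw [fnss_min, fnss_max, fnss_split0]
    cases List.foldl _ none _ <;> simp
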